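-- pv_equiv track=rewrite | github.com/PeterKADam/Bioinformatics | Eksamen/progexam.py | hydrophobic_subseqs
-- ===== SOURCE A (Python) =====
-- def hydrophobic_subseqs(pseq, hscores):
--     subseqlist = []
--     subsublist = []
--     for each in range(len(pseq)):
--         if hscores[each] > 0:
--             subsublist.append(pseq[each])
--         elif hscores[each] <= 0 and len(subsublist) > 0:
--             subseqlist.append("".join(subsublist))
--             subsublist = []
--     if len(subsublist) > 0:
--         subseqlist.append("".join(subsublist))
--     return subseqlist
-- ===== SOURCE B (Python) =====
-- def hydrophobic_subseqs(pseq, hscores):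
--     # Run-partition scan: pair up chars with scores, then extract each maximal
--     # positive-score run with a forward scan; no buffer/flush bookkeeping.
--     pairs = list(zip(pseq, hscores))
--     out = []
--     i, n = 0, len(pairs)
--     while i < n:
--         if pairs[i][1] > 0:
--             j = i + 1
--             while j < n and pairs[j][1] > 0:
--                 j += 1
--             out.append("".join(ch for ch, _ in pairs[i:j]))
--             i = j
--         else:
--             i += 1
--     return out
-- ===== Notes on version B (the rewrite author's own statement) =====
-- stated objective: alternative
-- what changed: Replaces the char-by-char buffer with flush-at-end-and-on-boundary logic by a run-partition scan over zipped (char,score) pairs that extracts each maximal positive run in one forward inner scan.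
import Mathlib
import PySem

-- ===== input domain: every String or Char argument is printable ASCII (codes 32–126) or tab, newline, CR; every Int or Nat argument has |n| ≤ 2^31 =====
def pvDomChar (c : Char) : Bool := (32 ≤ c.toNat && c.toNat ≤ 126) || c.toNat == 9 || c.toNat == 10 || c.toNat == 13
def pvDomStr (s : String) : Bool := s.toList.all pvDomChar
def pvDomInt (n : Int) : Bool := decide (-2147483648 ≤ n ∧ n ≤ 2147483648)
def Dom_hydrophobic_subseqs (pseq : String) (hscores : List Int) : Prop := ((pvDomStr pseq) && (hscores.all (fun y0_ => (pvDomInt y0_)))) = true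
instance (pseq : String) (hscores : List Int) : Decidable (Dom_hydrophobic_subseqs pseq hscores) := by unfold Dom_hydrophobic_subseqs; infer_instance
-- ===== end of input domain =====

-- B replaces A's buffer-and-flush accumulation by a run-partition scan over zipped (char,score) pairs (alternative decomposition, same cost).


-- ===== PORT A =====
-- final 'if len(subsublist) > 0: append' flush
def pvFlushA (st : List String × List Char) : List String :=
  if st.2.length > 0 then st.1 ++ [String.ofList st.2] else st.1

-- the loop body of A; under Pre_ every index 'each' is in range for both lists,
-- so getD's defaults are never used and the access is exact
def pvStepA (cs : List Char) (hs : List Int) (st : List String × List Char) (each : Nat) : List String × List Char :=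
  if hs.getD each 0 > 0 then (st.1, st.2 ++ [cs.getD each ' '])
  else if hs.getD each 0 ≤ 0 ∧ st.2.length > 0 then (st.1 ++ [String.ofList st.2], [])
  else st

def hydrophobic_subseqs (pseq : String) (hscores : List Int) : List String :=
  pvFlushA ((List.range pseq.toList.length).foldl (pvStepA pseq.toList hscores) ([], []))

-- ===== PORT B =====
-- Source B's outer while-loop over the suffix of pairs; the inner j-scan over the
-- current positive run is the takeWhile/dropWhile split of that suffix
def pvRuns : List (Char × Int) → List String
  | [] => []
  | (c, s) :: rest =>
    if s > 0 then
      String.ofList (c :: (rest.takeWhile (fun p => decide (p.2 > 0))).map Prod.fst)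
        :: pvRuns (rest.dropWhile (fun p => decide (p.2 > 0)))
    else pvRuns rest
termination_by l => l.length
decreasing_by
  · exact Nat.lt_succ_of_le (List.length_dropWhile_le _ _)
  · simp

def hydrophobic_subseqs_alt (pseq : String) (hscores : List Int) : List String :=
  pvRuns (pseq.toList.zip hscores)

-- ===== PRECONDITION & SPEC =====
-- A indexes hscores at every position of pseq, so it raises IndexError whenever
-- hscores is shorter than pseq; exactly those inputs are excluded.
def Pre_hydrophobic_subseqs (pseq : String) (hscores : List Int) : Prop :=
  pseq.toList.length ≤ hscores.length
instance (pseq : String) (hscores : List Int) : Decidable (Pre_hydrophobic_subseqs pseq hscores) := by unfold Pre_hydrophobic_subseqs; infer_instance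

def pvWitness_hydrophobic_subseqs : String × List Int := ("abc", [1, -1, 2])

def Spec_hydrophobic_subseqs (pseq : String) (hscores : List Int) (out : List String) : Prop := out = hydrophobic_subseqs_alt pseq hscores
instance (pseq : String) (hscores : List Int) (out : List String) : Decidable (Spec_hydrophobic_subseqs pseq hscores out) := by unfold Spec_hydrophobic_subseqs; infer_instance

-- ===== CLAIM (what is proved, stated in full; the proofs are below) =====
def Claim_equal_hydrophobic_subseqs : Prop := ∀ (pseq : String) (hscores : List Int), Dom_hydrophobic_subseqs pseq hscores → Pre_hydrophobic_subseqs pseq hscores → Spec_hydrophobic_subseqs pseq hscores (hydrophobic_subseqs pseq hscores)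

-- ===== LEMMAS AND PROOFS =====

-- pair-level version of A's loop body (the index is gone)
def pvStepP (st : List String × List Char) (p : Char × Int) : List String × List Char :=
  if p.2 > 0 then (st.1, st.2 ++ [p.1])
  else if st.2.length > 0 then (st.1 ++ [String.ofList st.2], []) else st

-- A's buffered scan written with an explicit pending buffer
def pvRunsB (buf : List Char) : List (Char × Int) → List String
  | [] => if buf.length > 0 then [String.ofList buf] else []
  | (c, s) :: rest =>
    if s > 0 then pvRunsB (buf ++ [c]) rest
    else if buf.length > 0 then String.ofList buf :: pvRunsB [] rest
    else pvRunsB [] rest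

theorem pvFoldIdx (cs : List Char) (hs : List Int) (n : Nat) (st : List String × List Char)
    (hn : n ≤ cs.length) (hl : cs.length ≤ hs.length) :
    (List.range n).foldl (pvStepA cs hs) st = ((cs.zip hs).take n).foldl pvStepP st := by
  induction n generalizing st with
  | zero => simp
  | succ k ih =>
    have hk : k < cs.length := Nat.lt_of_lt_of_le (Nat.lt_succ_self k) hn
    have hkz : k < (cs.zip hs).length := by
      simp [List.length_zip]; omega
    rw [List.range_succ, List.foldl_append, ih st (Nat.le_of_lt hk)]
    have htake : (cs.zip hs).take (k + 1) = (cs.zip hs).take k ++ [(cs.zip hs)[k]] :=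
      (List.take_succ_eq_append_getElem hkz)
    rw [htake, List.foldl_append]
    have hget : (cs.zip hs)[k] = (cs[k]'hk, hs[k]'(by omega)) := by
      simp [List.getElem_zip]
    simp only [List.foldl_cons, List.foldl_nil, hget]
    unfold pvStepA pvStepP
    rw [List.getD_eq_getElem cs ' ' hk, List.getD_eq_getElem hs 0 (by omega)]
    by_cases h : hs[k]'(by omega) > 0
    · simp [h]
    · have h2 : hs[k]'(by omega) ≤ 0 := by omega
      simp [h, h2]

theorem pvFlushFold (pairs : List (Char × Int)) (acc : List String) (buf : List Char) :
    pvFlushA (pairs.foldl pvStepP (acc, buf)) = acc ++ pvRunsB buf pairs := by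
  induction pairs generalizing acc buf with
  | nil => by_cases h : buf.length > 0 <;> simp [pvFlushA, pvRunsB, h]
  | cons p rest ih =>
    obtain ⟨c, s⟩ := p
    by_cases hs : s > 0
    · simp [pvStepP, pvRunsB, hs, ih]
    · by_cases hb : buf.length > 0
      · simp [pvStepP, pvRunsB, hs, hb, ih]
      · have hbe : buf = [] := List.eq_nil_of_length_eq_zero (by omega)
        subst hbe
        simp [pvStepP, pvRunsB, hs, ih]
theorem pvRunsB_pos (pairs : List (Char × Int)) (buf : List Char) (hb : buf ≠ []) :
    pvRunsB buf pairs =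
      String.ofList (buf ++ (pairs.takeWhile (fun p => decide (p.2 > 0))).map Prod.fst)
        :: pvRunsB [] (pairs.dropWhile (fun p => decide (p.2 > 0))) := by
  induction pairs generalizing buf with
  | nil => simp [pvRunsB, List.length_pos_iff.mpr hb]
  | cons p rest ih =>
    obtain ⟨c, s⟩ := p
    by_cases hs : s > 0
    · simp [pvRunsB, hs, ih (buf ++ [c]) (by simp)]
    · simp [pvRunsB, hs, List.length_pos_iff.mpr hb]

theorem pvRunsB_nil_eq (pairs : List (Char × Int)) : pvRunsB [] pairs = pvRuns pairs := by
  induction pairs using pvRuns.induct with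
  | case1 => simp [pvRunsB, pvRuns]
  | case2 c s rest hs ih =>
    rw [pvRuns, if_pos hs]
    have h1 : pvRunsB [] ((c, s) :: rest) = pvRunsB [c] rest := by simp [pvRunsB, hs]
    rw [h1, pvRunsB_pos rest [c] (by simp), ih]
    simp
  | case3 c s rest hs ih =>
    rw [pvRuns]
    simp only [if_neg hs]
    rw [show pvRunsB [] ((c, s) :: rest) = pvRunsB [] rest by simp [pvRunsB, hs]]
    exact ih

-- ===== VERDICT (by name: the statement is the Claim_ definition above) =====
theorem hydrophobic_subseqs_spec : Claim_equal_hydrophobic_subseqs := by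
  intro pseq hscores _ hpre
  unfold Spec_hydrophobic_subseqs hydrophobic_subseqs hydrophobic_subseqs_alt
  have hl : pseq.toList.length ≤ hscores.length := hpre
  rw [pvFoldIdx pseq.toList hscores pseq.toList.length ([], []) le_rfl hl]
  have : (pseq.toList.zip hscores).take pseq.toList.length = pseq.toList.zip hscores := by
    apply List.take_of_length_le; rw [List.length_zip]; omega
  rw [this, pvFlushFold, pvRunsB_nil_eq]
  simp
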